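-- pv_equiv track=rewrite | github.com/pogbonna-IAL/Content-Creator-App | api_server.py | clean_content
-- ===== SOURCE A (Python) =====
-- def clean_content(content: str) -> str:
--     """Clean up content by removing common prefixes"""
--     if not content:
--         return ""
--
--     lines = content.split('\n')
--     cleaned_lines = []
--     skip_prefixes = [
--         "your final answer must be",
--         "i now can give a great answer",
--         "here is the",
--     ]
--     skip_next = False
--     for line in lines:
--         line_lower = line.strip().lower()
--         if any(line_lower.startswith(prefix) for prefix in skip_prefixes):
--             skip_next = True
--             continue
--         if skip_next and not line.strip():
--             skip_next = False
--             continue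
--         skip_next = False
--         cleaned_lines.append(line)
--     return '\n'.join(cleaned_lines).strip()
-- ===== SOURCE B (Python) =====
-- def clean_content(content: str) -> str:
--     """Clean up content by removing common prefixes"""
--     if not content:
--         return ""
--
--     lines = content.split('\n')
--     skip_prefixes = [
--         "your final answer must be",
--         "i now can give a great answer",
--         "here is the",
--     ]
--     # First pass: index table of lines to drop.
--     drop = set()
--     for i, line in enumerate(lines):
--         t = line.strip().lower()
--         if any(t.startswith(p) for p in skip_prefixes):
--             drop.add(i)
--             if i + 1 < len(lines) and not lines[i + 1].strip():
--                 drop.add(i + 1)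
--     # Second pass: keep everything else.
--     kept = [line for i, line in enumerate(lines) if i not in drop]
--     return '\n'.join(kept).strip()
-- ===== Notes on version B (the rewrite author's own statement) =====
-- stated objective: alternative
-- what changed: Replaces A's single stateful scan with a carried skip_next flag by two passes: first build a set of line indices to drop (each matching line and a following blank line), then filter the lines by index.
import Mathlib
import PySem

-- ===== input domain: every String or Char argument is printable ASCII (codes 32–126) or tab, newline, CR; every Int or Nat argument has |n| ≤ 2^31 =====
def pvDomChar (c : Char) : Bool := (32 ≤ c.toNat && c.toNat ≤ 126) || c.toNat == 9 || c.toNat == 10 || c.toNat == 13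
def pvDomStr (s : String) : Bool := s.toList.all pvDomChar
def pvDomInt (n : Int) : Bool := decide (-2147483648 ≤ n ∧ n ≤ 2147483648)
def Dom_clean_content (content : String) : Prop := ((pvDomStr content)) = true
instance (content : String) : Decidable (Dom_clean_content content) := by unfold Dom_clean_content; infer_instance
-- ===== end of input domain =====

-- B replaces A's carried skip_next state machine by two passes: build a drop-set of line
-- indices, then filter by index (alternative decomposition, same O(n) cost).

-- ===== PORT A =====
-- shared literal: the skip_prefixes list (identical in both Pythons)
def ccPrefixes : List (List Char) :=
  ["your final answer must be".toList, "i now can give a great answer".toList, "here is the".toList]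

-- shared expression: any(line.strip().lower().startswith(p) for p in skip_prefixes)
def ccMatch (line : List Char) : Bool :=
  ccPrefixes.any (fun p => PySem.Chars.startswith (PySem.Chars.lower (PySem.Chars.strip line)) p)

-- A's for-loop with its carried skip_next flag
def ccLoopA (skip : Bool) : List (List Char) → List (List Char)
  | [] => []
  | l :: ls =>
    if ccMatch l then ccLoopA true ls
    else if skip && (PySem.Chars.strip l == []) then ccLoopA false ls
    else l :: ccLoopA false ls

def clean_content (content : String) : String :=
  if content == "" then ""
  else
    String.ofList (PySem.Chars.strip (PySem.Chars.join ['\n']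
      (ccLoopA false (PySem.Chars.splitOn content.toList ['\n']))))

-- ===== PORT B =====
-- B's first pass body: drop.add(i); if i+1 < len(lines) and not lines[i+1].strip(): drop.add(i+1)
def ccStep (lines : List (List Char)) (s : PySem.Set Int) (p : Int × List Char) : PySem.Set Int :=
  if ccMatch p.2 then
    let s1 := PySem.Set.add s p.1
    if (decide (p.1 + 1 < (lines.length : Int)) &&
        (PySem.Chars.strip (PySem.List.pyGetD lines (p.1 + 1) []) == [])) then
      PySem.Set.add s1 (p.1 + 1)
    else s1
  else s

def ccDrop (lines : List (List Char)) : PySem.Set Int :=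
  (PySem.List.enumerate lines).foldl (ccStep lines) PySem.Set.empty

def clean_content_alt (content : String) : String :=
  if content == "" then ""
  else
    let lines := PySem.Chars.splitOn content.toList ['\n']
    let drop := ccDrop lines
    let kept := ((PySem.List.enumerate lines).filter
        (fun p => !(PySem.Set.contains drop p.1))).map (·.2)
    String.ofList (PySem.Chars.strip (PySem.Chars.join ['\n'] kept))

-- ===== PRECONDITION & SPEC =====
def Spec_clean_content (content : String) (out : String) : Prop := out = clean_content_alt content
instance (content : String) (out : String) : Decidable (Spec_clean_content content out) := by unfold Spec_clean_content; infer_instance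

-- ===== CLAIM (what is proved, stated in full; the proofs are below) =====
def Claim_equal_clean_content : Prop := ∀ (content : String), Dom_clean_content content → Spec_clean_content content (clean_content content)

-- ===== LEMMAS AND PROOFS =====

-- A's skip_next flag, as a function of the position: on entering iteration n it equals
-- "the previous line matched a prefix".
def prevMatch (L : List (List Char)) : Nat → Bool
  | 0 => false
  | m + 1 => ccMatch (L[m]?.getD [])

theorem ccStep_eq (L : List (List Char)) (s : PySem.Set Int) (i : Int) (l : List Char) :
    ccStep L s (i, l) =
      if ccMatch l then
        (if (decide (i + 1 < (L.length : Int)) &&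
            (PySem.Chars.strip (PySem.List.pyGetD L (i + 1) []) == [])) then
          PySem.Set.add (PySem.Set.add s i) (i + 1)
        else PySem.Set.add s i)
      else s := rfl

theorem ccLoopA_cons (skip : Bool) (l : List Char) (ls : List (List Char)) :
    ccLoopA skip (l :: ls) =
      if ccMatch l then ccLoopA true ls
      else if skip && (PySem.Chars.strip l == []) then ccLoopA false ls
      else l :: ccLoopA false ls := rfl

theorem mem_foldl_ccStep (L : List (List Char)) (todo : List (List Char)) (start : Int)
    (s : PySem.Set Int) (x : Int) :
    x ∈ (PySem.List.enumerate todo start).foldl (ccStep L) s ↔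
      x ∈ s ∨ ∃ (k : Nat) (h : k < todo.length),
        ccMatch todo[k] = true ∧
        (x = start + k ∨ (start + k + 1 < (L.length : Int) ∧
          PySem.Chars.strip (PySem.List.pyGetD L (start + k + 1) []) = [] ∧
          x = start + k + 1)) := by
  induction todo generalizing start s with
  | nil => simp [PySem.List.enumerate_nil]
  | cons l ls ih =>
    rw [PySem.List.enumerate_cons, List.foldl_cons, ih, ccStep_eq]
    constructor
    · rintro (hx | ⟨k, hk, hm, hloc⟩)
      · -- x came from the head step
        split_ifs at hx with hml hbl
        · simp only [PySem.Set.mem_add] at hx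
          rcases hx with ((hx | hx) | hx)
          · exact Or.inl hx
          · exact Or.inr ⟨0, by simp, by simpa using hml,
              Or.inl (by push_cast [add_zero]; exact hx)⟩
          · simp only [Bool.and_eq_true, decide_eq_true_eq, beq_iff_eq] at hbl
            refine Or.inr ⟨0, by simp, by simpa using hml, Or.inr ?_⟩
            push_cast [add_zero]
            exact ⟨hbl.1, hbl.2, hx⟩
        · simp only [PySem.Set.mem_add] at hx
          rcases hx with (hx | hx)
          · exact Or.inl hx
          · exact Or.inr ⟨0, by simp, by simpa using hml,
              Or.inl (by push_cast [add_zero]; exact hx)⟩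
        · exact Or.inl hx
      · refine Or.inr ⟨k + 1, by simp only [List.length_cons]; omega, by simpa using hm, ?_⟩
        rcases hloc with h1 | ⟨h1, h2, h3⟩
        · exact Or.inl (by push_cast at h1 ⊢; omega)
        · refine Or.inr ⟨by push_cast at h1 ⊢; omega, ?_, by push_cast at h3 ⊢; omega⟩
          push_cast at h2 ⊢
          convert h2 using 3
          omega
    · rintro (hx | ⟨k, hk, hm, hloc⟩)
      · -- x already in s: it survives the head step (Set.add only grows)
        refine Or.inl ?_
        split_ifs <;> first
          | exact hx
          | (simp only [PySem.Set.mem_add]; tauto)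
      · cases k with
        | zero =>
          refine Or.inl ?_
          simp only [List.getElem_cons_zero] at hm
          rw [if_pos hm]
          push_cast [add_zero] at hloc
          rcases hloc with h1 | ⟨h1, h2, h3⟩
          · split_ifs <;> (simp only [PySem.Set.mem_add]; tauto)
          · have hcond : (decide (start + 1 < (L.length : Int)) &&
                (PySem.Chars.strip (PySem.List.pyGetD L (start + 1) []) == [])) = true := by
              simp only [Bool.and_eq_true, decide_eq_true_eq, beq_iff_eq]
              exact ⟨h1, h2⟩
            rw [if_pos hcond]
            simp only [PySem.Set.mem_add]
            tauto
        | succ k' =>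
          have hk' : k' < ls.length := by simp only [List.length_cons] at hk; omega
          refine Or.inr ⟨k', hk', by simpa using hm, ?_⟩
          rcases hloc with h1 | ⟨h1, h2, h3⟩
          · exact Or.inl (by push_cast at h1 ⊢; omega)
          · refine Or.inr ⟨by push_cast at h1 ⊢; omega, ?_, by push_cast at h3 ⊢; omega⟩
            push_cast at h2 ⊢
            convert h2 using 3
            omega

theorem contains_drop (L : List (List Char)) (n : Nat) (hn : n < L.length) :
    PySem.Set.contains (ccDrop L) (n : Int) =
      (ccMatch L[n] || (prevMatch L n && (PySem.Chars.strip L[n] == []))) := by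
  rw [Bool.eq_iff_iff, PySem.Set.contains_iff]
  unfold ccDrop
  rw [mem_foldl_ccStep]
  simp only [PySem.Set.empty, List.not_mem_nil, false_or, Bool.or_eq_true,
    Bool.and_eq_true, beq_iff_eq]
  constructor
  · rintro ⟨k, hk, hm, hloc⟩
    rcases hloc with h1 | ⟨h1, h2, h3⟩
    · have : k = n := by omega
      subst this; exact Or.inl hm
    · have hkn : n = k + 1 := by omega
      subst hkn
      refine Or.inr ⟨?_, ?_⟩
      · simp only [prevMatch]
        rw [List.getElem?_eq_getElem (show k < L.length by omega)]
        simpa using hm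
      · have hcast : (0 : Int) + (k : Int) + 1 = (((k + 1 : Nat)) : Int) := by push_cast; omega
        rw [hcast, PySem.List.pyGetD_natCast, List.getD_eq_getElem _ _ hn] at h2
        exact h2
  · rintro (hm | ⟨hp, hb⟩)
    · exact ⟨n, hn, hm, Or.inl (by omega)⟩
    · cases n with
      | zero => simp [prevMatch] at hp
      | succ m =>
        simp only [prevMatch] at hp
        have hmlt : m < L.length := by omega
        rw [List.getElem?_eq_getElem hmlt] at hp
        simp only [Option.getD_some] at hp
        refine ⟨m, hmlt, hp, Or.inr ⟨by omega, ?_, by omega⟩⟩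
        have hcast : (0 : Int) + (m : Int) + 1 = (((m + 1 : Nat)) : Int) := by push_cast; omega
        rw [hcast, PySem.List.pyGetD_natCast, List.getD_eq_getElem _ _ hn]
        exact hb

theorem loop_eq (L : List (List Char)) (n : Nat) (hn : n ≤ L.length) :
    ccLoopA (prevMatch L n) (L.drop n) =
      ((PySem.List.enumerate (L.drop n) (n : Int)).filter
        (fun p => !(PySem.Set.contains (ccDrop L) p.1))).map (·.2) := by
  induction hk : L.length - n generalizing n with
  | zero =>
    have : L.drop n = [] := List.drop_eq_nil_of_le (by omega)
    simp [this, PySem.List.enumerate_nil, ccLoopA]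
  | succ k ih =>
    have hlt : n < L.length := by omega
    have hdrop : L.drop n = L[n] :: L.drop (n + 1) := List.drop_eq_getElem_cons hlt
    rw [hdrop, ccLoopA_cons, PySem.List.enumerate_cons, List.filter_cons]
    dsimp only
    have hcont := contains_drop L n hlt
    have hprev1 : prevMatch L (n + 1) = ccMatch L[n] := by
      simp only [prevMatch]
      rw [List.getElem?_eq_getElem hlt]
      simp
    have hrec := ih (n + 1) (by omega) (by omega)
    have hcast : ((n : Int) + 1) = (((n + 1 : Nat)) : Int) := by push_cast; ring
    by_cases hml : ccMatch L[n] = true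
    · -- prefix line: dropped by both
      have hc : (!(PySem.Set.contains (ccDrop L) ((n : Int)))) = false := by
        rw [hcont, hml]; simp
      rw [if_pos hml, if_neg (by rw [hc]; decide), hcast, ← hrec, hprev1, hml]
    · have hml' : ccMatch L[n] = false := by simpa using hml
      by_cases hsb : (prevMatch L n && (PySem.Chars.strip L[n] == [])) = true
      · -- blank line right after a prefix line: dropped by both
        have hc : (!(PySem.Set.contains (ccDrop L) ((n : Int)))) = false := by
          rw [hcont, hml', hsb]; decide
        rw [if_neg (by rw [hml']; decide), if_pos hsb,
          if_neg (by rw [hc]; decide), hcast, ← hrec, hprev1, hml']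
      · -- ordinary line: kept by both
        have hsb' : (prevMatch L n && (PySem.Chars.strip L[n] == [])) = false := by
          simpa using hsb
        have hc : (!(PySem.Set.contains (ccDrop L) ((n : Int)))) = true := by
          rw [hcont, hml', hsb']; decide
        rw [if_neg (by rw [hml']; decide), if_neg (by rw [hsb']; decide),
          if_pos (by rw [hc]), List.map_cons, hcast, ← hrec, hprev1, hml']

-- ===== VERDICT (by name: the statement is the Claim_ definition above) =====
theorem clean_content_spec : Claim_equal_clean_content := by
  unfold Claim_equal_clean_content
  intro content _
  unfold Spec_clean_content clean_content clean_content_alt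
  by_cases h : content == ""
  · simp [h]
  · simp only [h, Bool.false_eq_true, reduceIte]
    have := loop_eq (PySem.Chars.splitOn content.toList ['\n']) 0 (by omega)
    simp only [prevMatch, List.drop_zero, Nat.cast_zero] at this
    rw [this]
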